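-- pv_equiv track=rewrite | github.com/randogoth/md2txt | md2txt.py | _stylize_delimited
-- ===== SOURCE A (Python) =====
-- from typing import Callable, Dict, Iterable, List, Optional, Tuple
--
-- def _stylize_delimited(
--
--     content: str,
--     delimiter: str,
--     transform: str = "preserve",
--     word_repeat: int = 2,
-- ) -> str:
--     def apply_transform(char: str) -> str:
--         if transform == "upper":
--             return char.upper()
--         if transform == "lower":
--             return char.lower()
--         return char
--
--     output: List[str] = []
--     open_sequence = False
--     pending_gap = False
--
--     for char in content:
--         if char.isspace():
--             if open_sequence:
--                 pending_gap = True
--             continue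
--
--         processed = apply_transform(char)
--         if not open_sequence:
--             output.append(delimiter)
--             open_sequence = True
--         else:
--             repeat = word_repeat if pending_gap else 1
--             output.append(delimiter * repeat)
--         output.append(processed)
--         pending_gap = False
--
--     if not open_sequence:
--         return delimiter * 2
--
--     output.append(delimiter)
--     return "".join(output)
-- ===== SOURCE B (Python) =====
-- def _stylize_delimited(
--     content: str,
--     delimiter: str,
--     transform: str = "preserve",
--     word_repeat: int = 2,
-- ) -> str:
--     if transform == "upper":
--         tf = str.upper
--     elif transform == "lower":
--         tf = str.lower
--     else:
--         tf = lambda s: s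
--
--     words = content.split()
--     if not words:
--         return delimiter * 2
--
--     parts = [delimiter.join(tf(word)) for word in words]
--     if len(parts) == 1:
--         body = parts[0]
--     else:
--         body = (delimiter * word_repeat).join(parts)
--     return delimiter + body + delimiter
-- ===== Notes on version B (the rewrite author's own statement) =====
-- stated objective: simpler
-- what changed: Replaces the stateful character loop (open_sequence/pending_gap flags driving piecewise appends) by a tokenize-then-join decomposition: split content into words, transform each word as a whole, join its characters with the delimiter, and join the words with delimiter*word_repeat between the outer delimiters.
import Mathlib
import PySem

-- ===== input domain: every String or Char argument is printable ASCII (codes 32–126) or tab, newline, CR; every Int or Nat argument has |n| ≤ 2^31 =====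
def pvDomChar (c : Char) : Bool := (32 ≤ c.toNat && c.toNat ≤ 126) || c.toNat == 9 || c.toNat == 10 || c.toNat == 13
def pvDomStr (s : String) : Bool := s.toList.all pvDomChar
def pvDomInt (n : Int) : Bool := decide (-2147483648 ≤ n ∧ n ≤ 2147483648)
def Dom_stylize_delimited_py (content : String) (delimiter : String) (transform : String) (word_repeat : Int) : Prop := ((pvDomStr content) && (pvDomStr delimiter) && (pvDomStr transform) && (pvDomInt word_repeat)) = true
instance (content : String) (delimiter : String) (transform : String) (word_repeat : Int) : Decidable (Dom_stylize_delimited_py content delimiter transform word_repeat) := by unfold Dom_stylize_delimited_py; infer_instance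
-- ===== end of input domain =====

-- B replaces A's stateful open_sequence/pending_gap character loop by a split-words-then-join decomposition (objective: simpler).

-- ===== PORT A =====
-- apply_transform on a single character (A applies the transform per character)
def pvTfA (transform : String) (c : Char) : Char :=
  if transform = "upper" then PySem.Chars.upperChar c
  else if transform = "lower" then PySem.Chars.lowerChar c
  else c

-- the 'for char in content' loop: state = (output pieces, open_sequence, pending_gap)
def pvLoopA (d : List Char) (wr : Int) (tf : Char → Char) :
    List Char → List (List Char) → Bool → Bool → List (List Char) × Bool
  | [], out, opn, _pend => (out, opn)
  | c :: rest, out, opn, pend =>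
    if PySem.Chars.isspace c then
      pvLoopA d wr tf rest out opn (if opn then true else pend)
    else
      let processed := tf c
      let out' := if !opn then out ++ [d]
                  else out ++ [PySem.List.pyRepeat d (if pend then wr else 1)]
      pvLoopA d wr tf rest (out' ++ [[processed]]) true false

def stylize_delimited_py (content : String) (delimiter : String) (transform : String) (word_repeat : Int) : String :=
  let d := delimiter.toList
  let res := pvLoopA d word_repeat (pvTfA transform) content.toList [] false false
  if !res.2 then String.ofList (PySem.List.pyRepeat d 2)
  else String.ofList (PySem.Chars.join [] (res.1 ++ [d]))

-- ===== PORT B =====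
-- the transform applied to a whole word (B transforms word-wise)
def pvTfB (transform : String) (w : List Char) : List Char :=
  if transform = "upper" then PySem.Chars.upper w
  else if transform = "lower" then PySem.Chars.lower w
  else w

def stylize_delimited_py_alt (content : String) (delimiter : String) (transform : String) (word_repeat : Int) : String :=
  let d := delimiter.toList
  let words := PySem.Chars.split₀ content.toList
  if words.isEmpty then String.ofList (PySem.List.pyRepeat d 2)
  else
    let parts := words.map (fun w => PySem.Chars.join d ((pvTfB transform w).map (fun c => [c])))
    let body := if parts.length = 1 then parts.headI
                else PySem.Chars.join (PySem.List.pyRepeat d word_repeat) parts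
    String.ofList (d ++ body ++ d)

-- ===== PRECONDITION & SPEC =====
def Spec_stylize_delimited_py (content : String) (delimiter : String) (transform : String) (word_repeat : Int) (out : String) : Prop := out = stylize_delimited_py_alt content delimiter transform word_repeat
instance (content : String) (delimiter : String) (transform : String) (word_repeat : Int) (out : String) : Decidable (Spec_stylize_delimited_py content delimiter transform word_repeat out) := by unfold Spec_stylize_delimited_py; infer_instance

-- ===== CLAIM (what is proved, stated in full; the proofs are below) =====
def Claim_equal_stylize_delimited_py : Prop := ∀ (content : String) (delimiter : String) (transform : String) (word_repeat : Int), Dom_stylize_delimited_py content delimiter transform word_repeat → Spec_stylize_delimited_py content delimiter transform word_repeat (stylize_delimited_py content delimiter transform word_repeat)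

-- ===== LEMMAS AND PROOFS =====

-- simple reference splitter: pvSw rest cur = words of rest, cur = reversed word in progress
def pvSw : List Char → List Char → List (List Char)
  | [], cur => if cur.isEmpty then [] else [cur.reverse]
  | c :: r, cur =>
    if PySem.Chars.isspace c then
      (if cur.isEmpty then pvSw r [] else cur.reverse :: pvSw r [])
    else pvSw r (c :: cur)

-- separator emitted before a character: delimiter*word_repeat after a gap, delimiter*1 inside a word
def pvSep (d : List Char) (wr : Int) (p : Bool) : List Char :=
  PySem.List.pyRepeat d (if p then wr else 1)

-- what A's loop emits from an open state with pending flag p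
def pvTail (d : List Char) (wr : Int) (tf : Char → Char) : List Char → Bool → List Char
  | [], _ => []
  | c :: r, p =>
    if PySem.Chars.isspace c then pvTail d wr tf r true
    else pvSep d wr p ++ [tf c] ++ pvTail d wr tf r false

-- one rendered word: characters transformed, joined by the delimiter
def pvRw (d : List Char) (tf : Char → Char) (w : List Char) : List Char :=
  PySem.Chars.join d (w.map (fun c => [tf c]))

-- rendered word list, each word preceded by its separator
def pvJw (d : List Char) (wr : Int) (tf : Char → Char) : List (List Char) → Bool → List Char
  | [], _ => []
  | w :: ws, p => pvSep d wr p ++ pvRw d tf w ++ pvJw d wr tf ws true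

theorem pvPyRepeat_one (d : List Char) : PySem.List.pyRepeat d 1 = d := by
  simp [PySem.List.pyRepeat]

theorem pvSep_true (d : List Char) (wr : Int) : pvSep d wr true = PySem.List.pyRepeat d wr := by
  simp [pvSep]

theorem pvSep_false (d : List Char) (wr : Int) : pvSep d wr false = d := by
  simp [pvSep, pvPyRepeat_one]

theorem pvSplitGo_eq (rest : List Char) : ∀ cur acc,
    PySem.Chars.split₀.go rest cur acc = acc.reverse ++ pvSw rest cur := by
  induction rest with
  | nil => intro cur acc; simp [PySem.Chars.split₀.go, pvSw]; split_ifs <;> simp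
  | cons c r ih =>
    intro cur acc
    simp only [PySem.Chars.split₀.go, pvSw]
    split_ifs with h hc
    · simp [ih]
    · simp [ih]
    · simp [ih]

theorem pvSplit₀_eq (s : List Char) : PySem.Chars.split₀ s = pvSw s [] := by
  simp [PySem.Chars.split₀, pvSplitGo_eq]

theorem pvSw_ne_nil (r : List Char) : ∀ cur, cur ≠ [] → pvSw r cur ≠ [] := by
  induction r with
  | nil => intro cur h; simp [pvSw, List.isEmpty_iff, h]
  | cons c r ih =>
    intro cur h
    simp only [pvSw]
    split_ifs with hs he
    · exact absurd (List.isEmpty_iff.mp he) h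
    · simp
    · exact ih (c :: cur) (by simp)

theorem pvJoin_nil_sep (l : List (List Char)) : PySem.Chars.join ([] : List Char) l = l.flatten := by
  induction l with
  | nil => simp [PySem.Chars.join, List.intercalate]
  | cons x l ih =>
    cases l with
    | nil => simp [PySem.Chars.join, List.intercalate]
    | cons y t =>
      rw [PySem.Chars.join_cons_cons, ih]
      simp

theorem pvRw_snoc (d : List Char) (tf : Char → Char) (w : List Char) (c : Char) (h : w ≠ []) :
    pvRw d tf (w ++ [c]) = pvRw d tf w ++ d ++ [tf c] := by
  induction w with
  | nil => exact absurd rfl h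
  | cons a w ih =>
    cases w with
    | nil => simp [pvRw, PySem.Chars.join_cons_cons, PySem.Chars.join_singleton]
    | cons b w' =>
      simp only [pvRw, List.cons_append, List.map_cons] at *
      rw [PySem.Chars.join_cons_cons, PySem.Chars.join_cons_cons]
      have := ih (by simp)
      simp only [List.map_append, List.map_cons, List.map_nil] at this
      simp [this]

theorem pvMain (d : List Char) (wr : Int) (tf : Char → Char) (rest : List Char) :
    (pvJw d wr tf (pvSw rest []) true = pvTail d wr tf rest true) ∧
    (∀ cur p, cur ≠ [] →
      pvJw d wr tf (pvSw rest cur) p = pvSep d wr p ++ pvRw d tf cur.reverse ++ pvTail d wr tf rest false) := by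
  induction rest with
  | nil =>
    constructor
    · simp [pvSw, pvJw, pvTail]
    · intro cur p h
      simp [pvSw, h, pvJw, pvTail]
  | cons c r ih =>
    constructor
    · by_cases hs : PySem.Chars.isspace c = true
      · simp [pvSw, hs, pvTail, ih.1]
      · simp only [pvSw, hs, Bool.false_eq_true, if_false, List.isEmpty_nil, if_true, pvTail]
        rw [ih.2 [c] true (by simp)]
        simp [pvRw, PySem.Chars.join_singleton]
    · intro cur p h
      by_cases hs : PySem.Chars.isspace c = true
      · have hne : cur.isEmpty = false := by simp [h]
        simp only [pvSw, hs, if_true, hne, Bool.false_eq_true, if_false, pvJw, pvTail]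
        rw [ih.1]
      · simp only [pvSw, hs, Bool.false_eq_true, if_false, pvTail]
        rw [ih.2 (c :: cur) p (by simp)]
        have : (c :: cur).reverse = cur.reverse ++ [c] := by simp
        rw [this, pvRw_snoc d tf cur.reverse c (by simp [h])]
        have hsep : pvSep d wr false = d := by simp [pvSep, pvPyRepeat_one]
        simp [hsep]

theorem pvLoop_open (d : List Char) (wr : Int) (tf : Char → Char) (rest : List Char) :
    ∀ out p, (pvLoopA d wr tf rest out true p).2 = true ∧
      (pvLoopA d wr tf rest out true p).1.flatten = out.flatten ++ pvTail d wr tf rest p := by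
  induction rest with
  | nil => intro out p; simp [pvLoopA, pvTail]
  | cons c r ih =>
    intro out p
    by_cases hs : PySem.Chars.isspace c = true
    · simp only [pvLoopA, hs, if_true, pvTail]
      exact ⟨(ih out true).1, (ih out true).2⟩
    · simp only [pvLoopA, hs, Bool.false_eq_true, if_false, Bool.not_true, if_true, pvTail]
      refine ⟨(ih _ false).1, ?_⟩
      rw [(ih _ false).2]
      simp [pvSep]

theorem pvFresh (d : List Char) (wr : Int) (tf : Char → Char) (rest : List Char) :
    (pvLoopA d wr tf rest [] false false).2 = !(pvSw rest []).isEmpty ∧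
    ((pvSw rest []).isEmpty = false →
      (pvLoopA d wr tf rest [] false false).1.flatten = pvJw d wr tf (pvSw rest []) false) := by
  induction rest with
  | nil => simp [pvLoopA, pvSw]
  | cons c r ih =>
    by_cases hs : PySem.Chars.isspace c = true
    · simpa only [pvLoopA, hs, if_true, if_false, pvSw, List.isEmpty_nil] using ih
    · have hne : pvSw r [c] ≠ [] := pvSw_ne_nil r [c] (by simp)
      have hne' : (pvSw r [c]).isEmpty = false := by simp [hne]
      simp only [pvLoopA, hs, Bool.false_eq_true, if_false, Bool.not_false, if_true, pvSw,
        List.isEmpty_nil]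
      constructor
      · simp [(pvLoop_open d wr tf r _ false).1, hne]
      · intro _
        rw [(pvLoop_open d wr tf r _ false).2]
        rw [(pvMain d wr tf r).2 [c] false (by simp)]
        simp [pvRw, PySem.Chars.join_singleton, pvSep_false]

theorem pvJw_true_eq (d : List Char) (wr : Int) (tf : Char → Char) (ws : List (List Char)) (h : ws ≠ []) :
    pvJw d wr tf ws true =
      PySem.List.pyRepeat d wr ++ PySem.Chars.join (PySem.List.pyRepeat d wr) (ws.map (pvRw d tf)) := by
  induction ws with
  | nil => exact absurd rfl h
  | cons w ws ih =>
    cases ws with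
    | nil => simp [pvJw, pvSep_true, PySem.Chars.join_singleton]
    | cons w' t =>
      simp only [pvJw, pvSep_true, List.map_cons]
      rw [PySem.Chars.join_cons_cons]
      have := ih (by simp)
      simp only [pvJw, pvSep_true, List.map_cons] at this
      simp [this]

theorem pvJw_false_eq (d : List Char) (wr : Int) (tf : Char → Char) (ws : List (List Char)) (h : ws ≠ []) :
    pvJw d wr tf ws false =
      d ++ PySem.Chars.join (PySem.List.pyRepeat d wr) (ws.map (pvRw d tf)) := by
  cases ws with
  | nil => exact absurd rfl h
  | cons w ws =>
    cases ws with
    | nil => simp [pvJw, pvSep_false, PySem.Chars.join_singleton]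
    | cons w' t =>
      have h2 := pvJw_true_eq d wr tf (w' :: t) (by simp)
      simp only [List.map_cons] at h2 ⊢
      rw [PySem.Chars.join_cons_cons]
      simp only [pvJw, pvSep_false, pvSep_true, List.append_assoc] at h2 ⊢
      rw [h2]

theorem pvTfB_eq (t : String) (w : List Char) : pvTfB t w = w.map (pvTfA t) := by
  unfold pvTfB pvTfA PySem.Chars.upper PySem.Chars.lower
  split_ifs <;> simp

-- ===== VERDICT (by name: the statement is the Claim_ definition above) =====
theorem stylize_delimited_py_spec : Claim_equal_stylize_delimited_py := by
  intro content delimiter transform word_repeat _hdom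
  unfold Spec_stylize_delimited_py stylize_delimited_py stylize_delimited_py_alt
  set d := delimiter.toList with hd
  set tf := pvTfA transform with htf
  set cs := content.toList with hcs
  have hsplit : PySem.Chars.split₀ cs = pvSw cs [] := pvSplit₀_eq cs
  have hfresh := pvFresh d word_repeat tf cs
  by_cases he : (pvSw cs []).isEmpty = true
  · -- no words: both return delimiter * 2
    have h2 : (pvLoopA d word_repeat tf cs [] false false).2 = false := by
      rw [hfresh.1, he]; rfl
    simp [hsplit, he, h2]
  · have he' : (pvSw cs []).isEmpty = false := by simpa using he
    have hne : pvSw cs [] ≠ [] := by simpa [List.isEmpty_iff] using he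
    have h2 : (pvLoopA d word_repeat tf cs [] false false).2 = true := by
      rw [hfresh.1, he']; rfl
    simp only [hsplit, he', Bool.false_eq_true, if_false, h2, Bool.not_true]
    have hflat : PySem.Chars.join ([] : List Char)
        ((pvLoopA d word_repeat tf cs [] false false).1 ++ [d]) =
        pvJw d word_repeat tf (pvSw cs []) false ++ d := by
      rw [pvJoin_nil_sep]
      simp [hfresh.2 he']
    rw [hflat, pvJw_false_eq d word_repeat tf (pvSw cs []) hne]
    have hif : ∀ L : List (List Char),
        (if L.length = 1 then L.headI else PySem.Chars.join (PySem.List.pyRepeat d word_repeat) L) =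
          PySem.Chars.join (PySem.List.pyRepeat d word_repeat) L := by
      intro L
      match L with
      | [] => simp
      | [x] => simp [PySem.Chars.join_singleton]
      | x :: y :: t => simp
    rw [hif]
    have hparts : (pvSw cs []).map (pvRw d tf) =
        (pvSw cs []).map (fun w => PySem.Chars.join d ((pvTfB transform w).map (fun c => [c]))) := by
      apply List.map_congr_left
      intro w _
      rw [pvTfB_eq, htf]
      simp [pvRw, List.map_map, Function.comp_def]
    rw [hparts]
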